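-- pv_equiv track=rewrite | github.com/Lenivvenil/archi2likec4 | archi2likec4/generators/views.py | _resolve_elements
-- ===== SOURCE A (Python) =====
-- def _resolve_elements(
--     element_archi_ids: list[str],
--     archi_to_c4: dict[str, str],
--     promoted_archi_to_c4: dict[str, list[str]] | None,
--     tech_archi_to_c4: dict[str, str] | None,
--     entity_archi_ids: set[str],
--     view_type: str,
-- ) -> tuple[list[str], list[str], int, int]:
--     """Resolve element archi_ids to c4 paths.
--
--     Returns (c4_paths, entity_paths, unresolved_count, total_counted_elements).
--
--     Resolution strategy per view_type:
--       - deployment: skip entities; prefer tech_archi_to_c4, fallback archi_to_c4, then promoted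
--       - functional: skip entities; use archi_to_c4, then promoted
--       - integration: separate entities into entity_paths; app elements via archi_to_c4 then promoted
--     """
--     c4_paths: list[str] = []
--     entity_paths: list[str] = []
--     unresolved = 0
--     non_entity_count = sum(1 for a in element_archi_ids if a not in entity_archi_ids)
--     use_tech = view_type == 'deployment'
--     collect_entities = view_type == 'integration'
--
--     for aid in element_archi_ids:
--         if aid in entity_archi_ids:
--             if collect_entities:
--                 entity_path = archi_to_c4.get(aid)
--                 if entity_path:
--                     entity_paths.append(entity_path)
--             continue
--
--         # Deployment prefers tech_archi_to_c4 lookup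
--         if use_tech and tech_archi_to_c4 and aid in tech_archi_to_c4:
--             c4_paths.append(tech_archi_to_c4[aid])
--         elif aid in archi_to_c4:
--             c4_paths.append(archi_to_c4[aid])
--         elif promoted_archi_to_c4 and aid in promoted_archi_to_c4:
--             c4_paths.extend(promoted_archi_to_c4[aid])
--         else:
--             unresolved += 1
--
--     return c4_paths, entity_paths, unresolved, non_entity_count
-- ===== SOURCE B (Python) =====
-- def _resolve_elements(
--     element_archi_ids,
--     archi_to_c4,
--     promoted_archi_to_c4,
--     tech_archi_to_c4,
--     entity_archi_ids,
--     view_type,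
-- ):
--     """Precedence-table formulation: build ONE merged lookup table (promoted,
--     overlaid by archi_to_c4, overlaid by tech on deployment views) so the whole
--     tech/archi/promoted branch chain becomes a single dict lookup; entities are
--     handled by partitioning the id list up front."""
--     merged = {}
--     for k, v in (promoted_archi_to_c4 or {}).items():
--         merged[k] = list(v)
--     for k, v in archi_to_c4.items():
--         merged[k] = [v]
--     if view_type == 'deployment':
--         for k, v in (tech_archi_to_c4 or {}).items():
--             merged[k] = [v]
--
--     app_ids = [a for a in element_archi_ids if a not in entity_archi_ids]
--     entity_paths = ([archi_to_c4[a] for a in element_archi_ids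
--                      if a in entity_archi_ids and archi_to_c4.get(a)]
--                     if view_type == 'integration' else [])
--
--     c4_paths = []
--     unresolved = 0
--     for a in app_ids:
--         paths = merged.get(a)
--         if paths is None:
--             unresolved += 1
--         else:
--             c4_paths.extend(paths)
--     return c4_paths, entity_paths, unresolved, len(app_ids)
-- ===== Notes on version B (the rewrite author's own statement) =====
-- stated objective: alternative
-- what changed: Replaces A's per-element tech/archi/promoted branch chain by ONE merged precedence dict built up front (promoted overlaid by archi overlaid by tech on deployment views) so the main loop is a single lookup, and handles entities by partitioning the id list into app ids and an entity-path comprehension instead of A's stateful four-variable loop with a separate counting pre-pass.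
import Mathlib
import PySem

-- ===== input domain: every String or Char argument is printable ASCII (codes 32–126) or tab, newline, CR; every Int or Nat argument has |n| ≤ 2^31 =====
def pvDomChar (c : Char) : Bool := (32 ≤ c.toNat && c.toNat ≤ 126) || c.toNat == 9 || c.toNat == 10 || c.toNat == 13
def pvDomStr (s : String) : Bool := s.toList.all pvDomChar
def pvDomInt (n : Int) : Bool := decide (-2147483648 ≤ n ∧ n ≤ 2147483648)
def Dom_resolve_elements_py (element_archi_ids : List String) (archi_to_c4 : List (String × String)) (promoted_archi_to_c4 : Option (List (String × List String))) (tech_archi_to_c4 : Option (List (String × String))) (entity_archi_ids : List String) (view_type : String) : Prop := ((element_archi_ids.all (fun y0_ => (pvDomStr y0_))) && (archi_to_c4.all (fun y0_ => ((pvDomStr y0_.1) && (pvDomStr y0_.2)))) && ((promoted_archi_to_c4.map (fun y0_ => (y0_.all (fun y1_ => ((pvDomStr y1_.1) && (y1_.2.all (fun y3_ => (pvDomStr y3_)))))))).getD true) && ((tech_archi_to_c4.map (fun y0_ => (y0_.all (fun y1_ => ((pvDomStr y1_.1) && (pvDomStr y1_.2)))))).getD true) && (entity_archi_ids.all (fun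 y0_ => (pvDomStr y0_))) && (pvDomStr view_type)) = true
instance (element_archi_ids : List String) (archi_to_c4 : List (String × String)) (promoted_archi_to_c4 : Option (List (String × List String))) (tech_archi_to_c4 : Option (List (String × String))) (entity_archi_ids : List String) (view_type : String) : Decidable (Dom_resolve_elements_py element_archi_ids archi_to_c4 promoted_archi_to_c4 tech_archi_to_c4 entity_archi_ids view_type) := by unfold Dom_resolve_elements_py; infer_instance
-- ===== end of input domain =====

-- B builds ONE merged precedence dict (promoted ⊲ archi ⊲ tech-on-deployment) so the branch chain
-- becomes a single lookup, and partitions the id list instead of A's stateful 4-variable loop;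
-- objective: alternative decomposition; Pre_ only excludes assoc lists no Python dict can be.


-- ===== PORT A =====
-- dict lookup, first match (exact for a Python dict rendered as an association list)
def pvLookup {α : Type} (d : List (String × α)) (k : String) : Option α :=
  (d.find? (fun p => p.1 == k)).map (·.2)

-- Python's `d and aid in d` guard followed by `d[aid]`, for an optional dict (None or empty dict is falsy)
def pvFalsyGet {α : Type} (o : Option (List (String × α))) (aid : String) : Option α :=
  match o with
  | some t => if t.isEmpty then none else pvLookup t aid
  | none => none

-- the body of A's for-loop, acting on the mutable state (c4_paths, entity_paths, unresolved)
def pvStepA (archi_to_c4 : List (String × String)) (promoted_archi_to_c4 : Option (List (String × List String))) (tech_archi_to_c4 : Option (List (String × String))) (entity_archi_ids : List String) (use_tech collect_entities : Bool) (st : List String × List String × Int) (aid : String) : List String × List String × Int :=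
  if entity_archi_ids.contains aid then
    if collect_entities then
      match pvLookup archi_to_c4 aid with
      | some p => if p ≠ "" then (st.1, st.2.1 ++ [p], st.2.2) else st   -- `if entity_path:` — truthy string
      | none => st
    else st
  else
    -- `use_tech and tech_archi_to_c4 and aid in tech_archi_to_c4` (an empty dict is falsy)
    match (if use_tech then pvFalsyGet tech_archi_to_c4 aid else none) with
    | some v => (st.1 ++ [v], st.2.1, st.2.2)
    | none =>
      match pvLookup archi_to_c4 aid with
      | some v => (st.1 ++ [v], st.2.1, st.2.2)
      | none =>
        match pvFalsyGet promoted_archi_to_c4 aid with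
        | some vs => (st.1 ++ vs, st.2.1, st.2.2)
        | none => (st.1, st.2.1, st.2.2 + 1)

def resolve_elements_py (element_archi_ids : List String) (archi_to_c4 : List (String × String)) (promoted_archi_to_c4 : Option (List (String × List String))) (tech_archi_to_c4 : Option (List (String × String))) (entity_archi_ids : List String) (view_type : String) : List String × List String × Int × Int :=
  let non_entity_count : Int :=
    element_archi_ids.foldl (fun s a => if entity_archi_ids.contains a then s else s + 1) 0
  let use_tech := view_type == "deployment"
  let collect_entities := view_type == "integration"
  let st := element_archi_ids.foldl
    (pvStepA archi_to_c4 promoted_archi_to_c4 tech_archi_to_c4 entity_archi_ids use_tech collect_entities)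
    ([], [], 0)
  (st.1, st.2.1, st.2.2, non_entity_count)

-- ===== PORT B =====
-- B builds the merged precedence dict once: promoted first, overwritten by archi, then (on
-- deployment views) by tech; Python's `merged[k] = v` is PySem.Dict.insert (overwrite in place).
def resolve_elements_py_alt (element_archi_ids : List String) (archi_to_c4 : List (String × String)) (promoted_archi_to_c4 : Option (List (String × List String))) (tech_archi_to_c4 : Option (List (String × String))) (entity_archi_ids : List String) (view_type : String) : List String × List String × Int × Int :=
  -- `list(v)` copies the list; a copy is the list itself here
  let m1 := (promoted_archi_to_c4.getD []).foldl
      (fun d kv => d.insert kv.1 kv.2) (PySem.Dict.empty : PySem.Dict String (List String))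
  let m2 := archi_to_c4.foldl (fun d kv => d.insert kv.1 [kv.2]) m1
  let merged := if view_type == "deployment" then
      (tech_archi_to_c4.getD []).foldl (fun d kv => d.insert kv.1 [kv.2]) m2
    else m2
  let app_ids := element_archi_ids.filter (fun a => !(entity_archi_ids.contains a))
  -- `[archi_to_c4[a] for a in element_archi_ids if a in entity_archi_ids and archi_to_c4.get(a)]`
  let entity_paths := if view_type == "integration" then
      element_archi_ids.filterMap (fun a =>
        if entity_archi_ids.contains a then
          match pvLookup archi_to_c4 a with
          | some p => if p ≠ "" then some p else none
          | none => none
        else none)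
    else []
  let st := app_ids.foldl (fun st a =>
      match merged.get? a with
      | some ps => (st.1 ++ ps, st.2)
      | none => (st.1, st.2 + 1)) (([] : List String), (0 : Int))
  (st.1, entity_paths, st.2, (app_ids.length : Int))

-- ===== PRECONDITION & SPEC =====
-- Pre_ excludes association lists with duplicate keys in any of the three dict arguments: a Python
-- dict cannot hold duplicate keys, so such lists represent no Python input, and on them the
-- first-match vs last-overwrite order is accidental.
def Pre_resolve_elements_py (element_archi_ids : List String) (archi_to_c4 : List (String × String)) (promoted_archi_to_c4 : Option (List (String × List String))) (tech_archi_to_c4 : Option (List (String × String))) (entity_archi_ids : List String) (view_type : String) : Prop :=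
  (archi_to_c4.map Prod.fst).Nodup ∧ ((promoted_archi_to_c4.getD []).map Prod.fst).Nodup ∧ ((tech_archi_to_c4.getD []).map Prod.fst).Nodup
instance (element_archi_ids : List String) (archi_to_c4 : List (String × String)) (promoted_archi_to_c4 : Option (List (String × List String))) (tech_archi_to_c4 : Option (List (String × String))) (entity_archi_ids : List String) (view_type : String) : Decidable (Pre_resolve_elements_py element_archi_ids archi_to_c4 promoted_archi_to_c4 tech_archi_to_c4 entity_archi_ids view_type) := by unfold Pre_resolve_elements_py; infer_instance

def pvWitness_resolve_elements_py : List String × (List (String × String)) × (Option (List (String × List String))) × (Option (List (String × String))) × List String × String :=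
  (["e1", "e2"], [("e1", "A/B")], some [("e2", ["P", "Q"])], none, ["e3"], "functional")

def Spec_resolve_elements_py (element_archi_ids : List String) (archi_to_c4 : List (String × String)) (promoted_archi_to_c4 : Option (List (String × List String))) (tech_archi_to_c4 : Option (List (String × String))) (entity_archi_ids : List String) (view_type : String) (out : List String × List String × Int × Int) : Prop := out = resolve_elements_py_alt element_archi_ids archi_to_c4 promoted_archi_to_c4 tech_archi_to_c4 entity_archi_ids view_type
instance (element_archi_ids : List String) (archi_to_c4 : List (String × String)) (promoted_archi_to_c4 : Option (List (String × List String))) (tech_archi_to_c4 : Option (List (String × String))) (entity_archi_ids : List String) (view_type : String) (out : List String × List String × Int × Int) : Decidable (Spec_resolve_elements_py element_archi_ids archi_to_c4 promoted_archi_to_c4 tech_archi_to_c4 entity_archi_ids view_type out) := by unfold Spec_resolve_elements_py; infer_instance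

-- ===== CLAIM (what is proved, stated in full; the proofs are below) =====
def Claim_equal_resolve_elements_py : Prop := ∀ (element_archi_ids : List String) (archi_to_c4 : List (String × String)) (promoted_archi_to_c4 : Option (List (String × List String))) (tech_archi_to_c4 : Option (List (String × String))) (entity_archi_ids : List String) (view_type : String), Dom_resolve_elements_py element_archi_ids archi_to_c4 promoted_archi_to_c4 tech_archi_to_c4 entity_archi_ids view_type → Pre_resolve_elements_py element_archi_ids archi_to_c4 promoted_archi_to_c4 tech_archi_to_c4 entity_archi_ids view_type → Spec_resolve_elements_py element_archi_ids archi_to_c4 promoted_archi_to_c4 tech_archi_to_c4 entity_archi_ids view_type (resolve_elements_py element_archi_ids archi_to_c4 promoted_archi_to_c4 tech_archi_to_c4 entity_archi_ids view_type)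

-- ===== LEMMAS AND PROOFS =====
lemma pvWitness_ok :
    Dom_resolve_elements_py (pvWitness_resolve_elements_py.1) (pvWitness_resolve_elements_py.2.1) (pvWitness_resolve_elements_py.2.2.1) (pvWitness_resolve_elements_py.2.2.2.1) (pvWitness_resolve_elements_py.2.2.2.2.1) (pvWitness_resolve_elements_py.2.2.2.2.2) ∧ Pre_resolve_elements_py (pvWitness_resolve_elements_py.1) (pvWitness_resolve_elements_py.2.1) (pvWitness_resolve_elements_py.2.2.1) (pvWitness_resolve_elements_py.2.2.2.1) (pvWitness_resolve_elements_py.2.2.2.2.1) (pvWitness_resolve_elements_py.2.2.2.2.2) := by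
  constructor <;> decide

-- A's truthiness-guarded optional-dict lookup equals first-match lookup in the defaulted dict
lemma pv_opt_lookup_eq {α : Type} (o : Option (List (String × α))) (aid : String) :
    pvFalsyGet o aid = pvLookup (o.getD []) aid := by
  cases o with
  | none => simp [pvFalsyGet, pvLookup]
  | some t => cases t <;> simp [pvFalsyGet, pvLookup]

-- the tech→archi→promoted resolution chain of A, per element
def pvChain (archi : List (String × String)) (promD : List (String × List String)) (techD : List (String × String)) (ut : Bool) (a : String) : Option (List String) :=
  match (if ut then pvLookup techD a else none) with
  | some v => some [v]
  | none =>
    match pvLookup archi a with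
    | some v => some [v]
    | none => pvLookup promD a

-- the entity-path contribution of one id, per element
def pvEntOpt (archi : List (String × String)) (a : String) : Option String :=
  match pvLookup archi a with
  | some p => if p ≠ "" then some p else none
  | none => none

-- folding Dict.insert over a nodup-keyed source: lookup = first match in the source, else the base
lemma pv_get_fold_insert {α β : Type} (f : α → β) :
    ∀ (src : List (String × α)) (d : PySem.Dict String β) (a : String),
      (src.map Prod.fst).Nodup →
      (src.foldl (fun d kv => d.insert kv.1 (f kv.2)) d).get? a
        = ((src.find? (fun p => p.1 == a)).map (fun kv => f kv.2)).or (d.get? a) := by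
  intro src
  induction src with
  | nil => intro d a _; simp
  | cons kv rest ih =>
    intro d a hnd
    simp only [List.map_cons, List.nodup_cons] at hnd
    rw [List.foldl_cons, ih _ _ hnd.2, List.find?_cons]
    by_cases h : kv.1 = a
    · have hf : rest.find? (fun p => p.1 == a) = none := by
        rw [List.find?_eq_none]
        intro x hx hbe
        have hx1 : x.1 = kv.1 := (eq_of_beq hbe).trans h.symm
        exact hnd.1 (by simpa [hx1] using List.mem_map_of_mem (f := Prod.fst) hx)
      simp [h, hf, PySem.Dict.get?_insert]
    · have hb : (kv.1 == a) = false := by simpa using h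
      simp [hb, PySem.Dict.get?_insert, Ne.symm h]

-- under Pre_'s nodup keys, the merged dict lookup IS A's resolution chain
lemma pv_merged_eq_chain (archi : List (String × String)) (promD : List (String × List String)) (techD : List (String × String)) (ut : Bool)
    (h1 : (archi.map Prod.fst).Nodup) (h2 : (promD.map Prod.fst).Nodup) (h3 : (techD.map Prod.fst).Nodup) (a : String) :
    ((if ut then
        techD.foldl (fun d kv => d.insert kv.1 [kv.2])
          (archi.foldl (fun d kv => d.insert kv.1 [kv.2])
            (promD.foldl (fun d kv => d.insert kv.1 kv.2) (PySem.Dict.empty : PySem.Dict String (List String))))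
      else
        archi.foldl (fun d kv => d.insert kv.1 [kv.2])
          (promD.foldl (fun d kv => d.insert kv.1 kv.2) (PySem.Dict.empty : PySem.Dict String (List String)))).get? a)
      = pvChain archi promD techD ut a := by
  have hp : (promD.foldl (fun d kv => d.insert kv.1 kv.2) (PySem.Dict.empty : PySem.Dict String (List String))).get? a
      = ((promD.find? (fun p => p.1 == a)).map (·.2)).or none := by
    simpa using pv_get_fold_insert (fun v => v) promD PySem.Dict.empty a h2
  have ha := pv_get_fold_insert (fun v => [v]) archi
      (promD.foldl (fun d kv => d.insert kv.1 kv.2) (PySem.Dict.empty : PySem.Dict String (List String))) a h1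
  cases ut with
  | false =>
    simp only [if_false, Bool.false_eq_true, ha, hp, pvChain, pvLookup]
    cases archi.find? (fun p => p.1 == a) <;> cases promD.find? (fun p => p.1 == a) <;> simp
  | true =>
    have ht := pv_get_fold_insert (fun v => [v]) techD
        (archi.foldl (fun d kv => d.insert kv.1 [kv.2])
          (promD.foldl (fun d kv => d.insert kv.1 kv.2) (PySem.Dict.empty : PySem.Dict String (List String)))) a h3
    simp only [if_true, ht, ha, hp, pvChain, pvLookup]
    cases techD.find? (fun p => p.1 == a) <;> cases archi.find? (fun p => p.1 == a) <;>
      cases promD.find? (fun p => p.1 == a) <;> simp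

-- A's loop body, characterised per element via pvChain / pvEntOpt
lemma pv_stepA_char (a2c : List (String × String)) (prom : Option (List (String × List String))) (tech : Option (List (String × String))) (ents : List String) (ut ce : Bool) (st : List String × List String × Int) (aid : String) :
    pvStepA a2c prom tech ents ut ce st aid
      = if ents.contains aid then
          (st.1, st.2.1 ++ (if ce then (pvEntOpt a2c aid).toList else []), st.2.2)
        else
          match pvChain a2c (prom.getD []) (tech.getD []) ut aid with
          | some ps => (st.1 ++ ps, st.2.1, st.2.2)
          | none => (st.1, st.2.1, st.2.2 + 1) := by
  unfold pvStepA pvChain pvEntOpt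
  rw [pv_opt_lookup_eq tech, pv_opt_lookup_eq prom]
  by_cases h : ents.contains aid = true
  · simp only [h, if_true]
    cases ce <;> simp <;>
      rcases hl : pvLookup a2c aid with _ | p <;> simp [hl] <;> split_ifs <;> simp
  · simp only [h, if_false, Bool.false_eq_true]
    cases ht : (if ut then pvLookup (tech.getD []) aid else none) with
    | some v => simp [ht]
    | none =>
      cases ha : pvLookup a2c aid with
      | some v => simp [ht, ha]
      | none => cases hp : pvLookup (prom.getD []) aid <;> simp [ht, ha, hp]

-- A's main loop in closed form: filtered flatMap over the chain, filterMap for entities, countP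
lemma pv_foldA (a2c : List (String × String)) (prom : Option (List (String × List String))) (tech : Option (List (String × String))) (ents : List String) (ut ce : Bool) :
    ∀ (eids : List String) (c e : List String) (u : Int),
      eids.foldl (pvStepA a2c prom tech ents ut ce) (c, e, u)
        = (c ++ (eids.filter (fun a => !(ents.contains a))).flatMap
              (fun a => (pvChain a2c (prom.getD []) (tech.getD []) ut a).getD []),
           e ++ (if ce then eids.filterMap (fun a => if ents.contains a then pvEntOpt a2c a else none) else []),
           u + (((eids.filter (fun a => !(ents.contains a))).countP
              (fun a => (pvChain a2c (prom.getD []) (tech.getD []) ut a).isNone) : Nat) : Int)) := by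
  intro eids
  induction eids with
  | nil => intro c e u; simp
  | cons x xs ih =>
    intro c e u
    rw [List.foldl_cons, pv_stepA_char]
    by_cases h : ents.contains x = true
    · have hm : x ∈ ents := by simpa using h
      rw [if_pos h, ih]
      cases ce with
      | false => simp [List.filter_cons, hm]
      | true =>
        simp only [List.filter_cons, hm, List.filterMap_cons, h, if_true, Prod.mk.injEq,
          if_pos, decide_true, Bool.not_true, Bool.false_eq_true, if_false]
        cases pvEntOpt a2c x <;> simp [List.append_assoc]
    · have hm : x ∉ ents := by simpa using h
      rw [if_neg h]
      cases hc : pvChain a2c (prom.getD []) (tech.getD []) ut x with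
      | some ps =>
        rw [ih]
        simp [List.filter_cons, hm, h, hc, List.append_assoc]
      | none =>
        rw [ih]
        simp [List.filter_cons, hm, h, hc]
        omega

-- A's counting pre-pass equals the length of the non-entity filter
lemma pv_count_eq (ents : List String) :
    ∀ (eids : List String) (s : Int),
      eids.foldl (fun s a => if ents.contains a then s else s + 1) s
        = s + (((eids.filter (fun a => !(ents.contains a))).length : Nat) : Int) := by
  intro eids
  induction eids with
  | nil => intro s; simp
  | cons x xs ih =>
    intro s
    rw [List.foldl_cons]
    by_cases h : ents.contains x = true
    · have hm : x ∈ ents := by simpa using h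
      rw [if_pos h, ih]
      simp [List.filter_cons, hm]
    · have hm : x ∉ ents := by simpa using h
      rw [if_neg h, ih]
      simp [List.filter_cons, hm]
      omega

-- B's main loop in closed form over an arbitrary lookup function
lemma pv_foldB (g : String → Option (List String)) :
    ∀ (l : List String) (c : List String) (u : Int),
      l.foldl (fun st a =>
          match g a with
          | some ps => (st.1 ++ ps, st.2)
          | none => (st.1, st.2 + 1)) (c, u)
        = (c ++ l.flatMap (fun a => (g a).getD []),
           u + ((l.countP (fun a => (g a).isNone) : Nat) : Int)) := by
  intro l
  induction l with
  | nil => intro c u; simp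
  | cons x xs ih =>
    intro c u
    rw [List.foldl_cons]
    cases hg : g x with
    | some ps =>
      rw [ih]
      simp [hg, List.append_assoc]
    | none =>
      rw [ih]
      simp [hg]
      omega

-- ===== VERDICT (by name: the statement is the Claim_ definition above) =====
theorem resolve_elements_py_spec : Claim_equal_resolve_elements_py := by
  intro eids a2c prom tech ents vt _ hpre
  obtain ⟨h1, h2, h3⟩ := hpre
  show resolve_elements_py eids a2c prom tech ents vt = resolve_elements_py_alt eids a2c prom tech ents vt
  unfold resolve_elements_py resolve_elements_py_alt
  simp only [pv_foldA, pv_count_eq, pv_foldB,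
    pv_merged_eq_chain a2c (prom.getD []) (tech.getD []) (vt == "deployment") h1 h2 h3]
  simp [pvEntOpt]
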